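-- pv_equiv track=rewrite | github.com/Yuer867/EMO-Disentanger | stage2_accompaniment/inference.py | merge_tracks
-- ===== SOURCE A (Python) =====
-- from collections import defaultdict
--
-- def merge_tracks(melody_track, chord_track):
--     events = melody_track[1:3]
--
--     melody_beat = defaultdict(list)
--     if len(melody_track) > 3:
--         note_seq = []
--         beat = melody_track[3]
--         melody_track = melody_track[4:]
--         for p in range(len(melody_track)):
--             if 'Beat' in melody_track[p]:
--                 melody_beat[beat] = note_seq
--                 note_seq = []
--                 beat = melody_track[p]
--             else:
--                 note_seq.append(melody_track[p])
--         melody_beat[beat] = note_seq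
--
--     chord_beat = defaultdict(list)
--     if len(chord_track) > 2:
--         chord_seq = []
--         beat = chord_track[2]
--         chord_track = chord_track[3:]
--         for p in range(len(chord_track)):
--             if 'Beat' in chord_track[p]:
--                 chord_beat[beat] = chord_seq
--                 chord_seq = []
--                 beat = chord_track[p]
--             else:
--                 chord_seq.append(chord_track[p])
--         chord_beat[beat] = chord_seq
--
--     for b in range(16):
--         beat = 'Beat_{}'.format(b)
--         if beat in chord_beat or beat in melody_beat:
--             events.append(beat)
--             if beat in chord_beat:
--                 events.extend(chord_beat[beat])
--             if beat in melody_beat: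
--                 events.extend(melody_beat[beat])
--
--     return events
-- ===== SOURCE B (Python) =====
-- def _parse(track, off):
--     """Yield (beat, group) pairs: the token at `off` opens the first group; each
--     later token containing 'Beat' closes the current group and opens a new one."""
--     if len(track) <= off:
--         return
--     beat, rest = track[off], track[off + 1:]
--     while True:
--         i = next((j for j, t in enumerate(rest) if 'Beat' in t), None)
--         if i is None:
--             yield beat, rest
--             return
--         yield beat, rest[:i]
--         beat, rest = rest[i], rest[i + 1:]
--
--
-- def merge_tracks(melody_track, chord_track):
--     events = melody_track[1:3]
--     melody_beat = dict(_parse(melody_track, 3))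
--     chord_beat = dict(_parse(chord_track, 2))
--     chunks = []
--     for b in range(16):
--         beat = 'Beat_{}'.format(b)
--         if beat in chord_beat or beat in melody_beat:
--             chunks.append([beat] + chord_beat.get(beat, []) + melody_beat.get(beat, []))
--     return events + [tok for ch in chunks for tok in ch]
-- ===== Notes on version B (the rewrite author's own statement) =====
-- stated objective: alternative
-- what changed: A groups tokens with an index loop mutating a running (dict, current-seq, current-beat) state; B is a span-based generator parser that slices each beat's group between consecutive 'Beat' markers and feeds the (beat, group) pairs to dict(), keeping last duplicates, then assembles the output by flattening per-beat chunks instead of conditional in-place extends.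
import Mathlib
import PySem

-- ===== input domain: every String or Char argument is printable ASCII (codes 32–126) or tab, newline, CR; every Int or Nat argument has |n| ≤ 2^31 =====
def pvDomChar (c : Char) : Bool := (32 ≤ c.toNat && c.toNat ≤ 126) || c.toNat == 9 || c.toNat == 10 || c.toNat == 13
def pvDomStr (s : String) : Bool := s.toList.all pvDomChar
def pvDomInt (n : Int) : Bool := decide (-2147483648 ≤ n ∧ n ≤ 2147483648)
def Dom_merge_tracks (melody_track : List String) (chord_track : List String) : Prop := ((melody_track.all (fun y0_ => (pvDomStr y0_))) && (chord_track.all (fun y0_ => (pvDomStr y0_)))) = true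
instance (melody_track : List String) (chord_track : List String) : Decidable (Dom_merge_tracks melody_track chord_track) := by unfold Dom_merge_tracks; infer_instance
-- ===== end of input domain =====

-- B replaces A's index loop with in-place accumulators by a span-based parser that
-- slices each beat's group between consecutive 'Beat' markers; objective: alternative
-- decomposition (same cost).

-- ===== PORT A =====
-- loop body of A's beat-grouping passes ('Beat' in t closes the group and opens a new one)
def mtStep (st : PySem.Dict String (List String) × List String × String) (t : String) :
    PySem.Dict String (List String) × List String × String :=
  if PySem.Str.isIn "Beat" t then (st.1.insert st.2.2 st.2.1, [], t)
  else (st.1, st.2.1 ++ [t], st.2.2)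

def merge_tracks (melody_track : List String) (chord_track : List String) : List String :=
  let events := PySem.List.slice melody_track (some 1) (some 3)
  let melody_beat : PySem.Dict String (List String) :=
    if melody_track.length > 3 then
      let beat := PySem.List.pyGetD melody_track 3 ""
      let mt := PySem.List.slice melody_track (some 4) none
      let st := mt.foldl mtStep (PySem.Dict.empty, [], beat)
      st.1.insert st.2.2 st.2.1
    else PySem.Dict.empty
  let chord_beat : PySem.Dict String (List String) :=
    if chord_track.length > 2 then
      let beat := PySem.List.pyGetD chord_track 2 ""
      let ct := PySem.List.slice chord_track (some 3) none
      let st := ct.foldl mtStep (PySem.Dict.empty, [], beat)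
      st.1.insert st.2.2 st.2.1
    else PySem.Dict.empty
  (PySem.List.pyRange 0 16 1).foldl (fun ev b =>
    let beat := "Beat_" ++ PySem.Int.toStr b
    if chord_beat.contains beat || melody_beat.contains beat then
      let ev := ev ++ [beat]
      let ev := if chord_beat.contains beat then ev ++ chord_beat.getD beat [] else ev
      if melody_beat.contains beat then ev ++ melody_beat.getD beat [] else ev
    else ev) events

-- ===== PORT B =====
-- 'Beat' not in t
def notBeat (t : String) : Bool := !(PySem.Str.isIn "Beat" t)

-- B's _parse after its first step: current key `beat`, its group = the span of tokens up
-- to the next 'Beat' marker, then recurse on the marker and the remainder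
def parseBeats (beat : String) (rest : List String) : List (String × List String) :=
  match h : rest.dropWhile notBeat with
  | [] => [(beat, rest.takeWhile notBeat)]
  | m :: rest' => (beat, rest.takeWhile notBeat) :: parseBeats m rest'
termination_by rest.length
decreasing_by
  have h1 := List.length_dropWhile_le notBeat rest
  rw [h] at h1; simp at h1; omega

-- B's _parse(track, off): empty unless the track reaches past `off`
def parseTrack (track : List String) (off : Int) : List (String × List String) :=
  if (track.length : Int) ≤ off then []
  else parseBeats (PySem.List.pyGetD track off "") (PySem.List.slice track (some (off + 1)) none)

def merge_tracks_alt (melody_track : List String) (chord_track : List String) : List String :=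
  let events := PySem.List.slice melody_track (some 1) (some 3)
  let melody_beat := PySem.Dict.ofList (parseTrack melody_track 3)
  let chord_beat := PySem.Dict.ofList (parseTrack chord_track 2)
  let chunks := (PySem.List.pyRange 0 16 1).filterMap (fun b =>
    let beat := "Beat_" ++ PySem.Int.toStr b
    if chord_beat.contains beat || melody_beat.contains beat then
      some ([beat] ++ chord_beat.getD beat [] ++ melody_beat.getD beat [])
    else none)
  events ++ chunks.flatMap id

-- ===== PRECONDITION & SPEC =====
def Spec_merge_tracks (melody_track : List String) (chord_track : List String) (out : List String) : Prop := out = merge_tracks_alt melody_track chord_track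
instance (melody_track : List String) (chord_track : List String) (out : List String) : Decidable (Spec_merge_tracks melody_track chord_track out) := by unfold Spec_merge_tracks; infer_instance

-- ===== CLAIM (what is proved, stated in full; the proofs are below) =====
def Claim_equal_merge_tracks : Prop := ∀ (melody_track : List String) (chord_track : List String), Dom_merge_tracks melody_track chord_track → Spec_merge_tracks melody_track chord_track (merge_tracks melody_track chord_track)

-- ===== LEMMAS AND PROOFS =====

-- A's loop state written as the list of (key, group) assignments it will perform
def parseAcc (beat : String) (seq : List String) : List String → List (String × List String)
  | [] => [(beat, seq)]
  | t :: xs =>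
    if PySem.Str.isIn "Beat" t then (beat, seq) :: parseAcc t [] xs
    else parseAcc beat (seq ++ [t]) xs

theorem foldl_mtStep_eq_parseAcc (xs : List String) (d : PySem.Dict String (List String))
    (seq : List String) (beat : String) :
    (xs.foldl mtStep (d, seq, beat)).1.insert (xs.foldl mtStep (d, seq, beat)).2.2
        (xs.foldl mtStep (d, seq, beat)).2.1
      = (parseAcc beat seq xs).foldl (fun d p => d.insert p.1 p.2) d := by
  induction xs generalizing d seq beat with
  | nil => simp [parseAcc]
  | cons t xs ih =>
    simp only [List.foldl_cons]
    cases hb : PySem.Str.isIn "Beat" t with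
    | true =>
      have e1 : mtStep (d, seq, beat) t = (d.insert beat seq, [], t) := by
        unfold mtStep; rw [if_pos hb]
      have e2 : parseAcc beat seq (t :: xs) = (beat, seq) :: parseAcc t [] xs := by
        simp only [parseAcc]; rw [if_pos hb]
      rw [e1, e2, List.foldl_cons, ih]
    | false =>
      have e1 : mtStep (d, seq, beat) t = (d, seq ++ [t], beat) := by
        unfold mtStep; rw [if_neg (by simp only [Bool.not_eq_true]; exact hb)]
      have e2 : parseAcc beat seq (t :: xs) = parseAcc beat (seq ++ [t]) xs := by
        simp only [parseAcc]; rw [if_neg (by simp only [Bool.not_eq_true]; exact hb)]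
      rw [e1, e2, ih]

theorem parseBeats_eq (beat : String) (rest : List String) :
    parseBeats beat rest = (beat, rest.takeWhile notBeat) ::
      (match rest.dropWhile notBeat with
       | [] => []
       | m :: rest' => parseBeats m rest') := by
  rw [parseBeats]
  cases h : rest.dropWhile notBeat <;> simp

theorem parseAcc_eq (rest : List String) (beat : String) (seq : List String) :
    parseAcc beat seq rest = (beat, seq ++ rest.takeWhile notBeat) ::
      (match rest.dropWhile notBeat with
       | [] => []
       | m :: rest' => parseBeats m rest') := by
  induction rest generalizing beat seq with
  | nil => simp [parseAcc]
  | cons t xs ih =>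
    cases hb : PySem.Str.isIn "Beat" t with
    | true =>
      have hn : notBeat t = false := by unfold notBeat; rw [hb]; rfl
      have e2 : parseAcc beat seq (t :: xs) = (beat, seq) :: parseAcc t [] xs := by
        simp only [parseAcc]; rw [if_pos hb]
      rw [e2, List.takeWhile_cons, List.dropWhile_cons, hn]
      simp only [Bool.false_eq_true, if_false, List.append_nil]
      congr 1
      rw [ih, parseBeats_eq t xs]
      simp
    | false =>
      have hn : notBeat t = true := by unfold notBeat; rw [hb]; rfl
      have e2 : parseAcc beat seq (t :: xs) = parseAcc beat (seq ++ [t]) xs := by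
        simp only [parseAcc]; rw [if_neg (by simp only [Bool.not_eq_true]; exact hb)]
      rw [e2, List.takeWhile_cons, List.dropWhile_cons, hn, ih]
      simp

theorem parseAcc_eq_parseBeats (rest : List String) (beat : String) :
    parseAcc beat [] rest = parseBeats beat rest := by
  rw [parseAcc_eq, parseBeats_eq]; simp

-- dict(pairs) is the insert fold
theorem dict_ofList_eq_foldl (pairs : List (String × List String)) :
    PySem.Dict.ofList pairs = pairs.foldl (fun d p => d.insert p.1 p.2) PySem.Dict.empty := by
  rfl

-- one beat-grouping pass of A equals dict(_parse(track, off)) of B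
theorem pass_eq (track : List String) (off : Nat) :
    (if track.length > off then
      (((PySem.List.slice track (some ((off : Int) + 1)) none).foldl mtStep
          (PySem.Dict.empty, [], PySem.List.pyGetD track (off : Int) "")).1.insert
        ((PySem.List.slice track (some ((off : Int) + 1)) none).foldl mtStep
          (PySem.Dict.empty, [], PySem.List.pyGetD track (off : Int) "")).2.2
        ((PySem.List.slice track (some ((off : Int) + 1)) none).foldl mtStep
          (PySem.Dict.empty, [], PySem.List.pyGetD track (off : Int) "")).2.1)
    else PySem.Dict.empty) = PySem.Dict.ofList (parseTrack track (off : Int)) := by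
  by_cases h : track.length > off
  · rw [if_pos h]
    unfold parseTrack
    rw [if_neg (by exact_mod_cast Nat.not_le.mpr h)]
    rw [dict_ofList_eq_foldl, ← parseAcc_eq_parseBeats]
    exact foldl_mtStep_eq_parseAcc _ _ _ _
  · rw [if_neg h]
    unfold parseTrack
    rw [if_pos (by exact_mod_cast Nat.le_of_not_lt h)]
    rfl

-- the assembly loop: a foldl of conditional appends is the flattening of the kept chunks
theorem assemble_eq (CB MB : PySem.Dict String (List String)) (l : List Int) (acc : List String) :
    l.foldl (fun ev b =>
      let beat := "Beat_" ++ PySem.Int.toStr b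
      if CB.contains beat || MB.contains beat then
        let ev := ev ++ [beat]
        let ev := if CB.contains beat then ev ++ CB.getD beat [] else ev
        if MB.contains beat then ev ++ MB.getD beat [] else ev
      else ev) acc
    = acc ++ (l.filterMap (fun b =>
        let beat := "Beat_" ++ PySem.Int.toStr b
        if CB.contains beat || MB.contains beat then
          some ([beat] ++ CB.getD beat [] ++ MB.getD beat [])
        else none)).flatMap id := by
  induction l generalizing acc with
  | nil => simp
  | cons x xs ih =>
    simp only [List.foldl_cons, List.filterMap_cons]
    rw [ih]
    by_cases h1 : CB.contains ("Beat_" ++ PySem.Int.toStr x) <;>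
      by_cases h2 : MB.contains ("Beat_" ++ PySem.Int.toStr x) <;>
        simp [h1, h2, List.append_assoc, PySem.Dict.getD_of_not_contains]

theorem merge_tracks_eq_alt (melody_track chord_track : List String) :
    merge_tracks melody_track chord_track = merge_tracks_alt melody_track chord_track := by
  unfold merge_tracks merge_tracks_alt
  have hm := pass_eq melody_track 3
  have hc := pass_eq chord_track 2
  norm_num at hm hc
  simp only [hm, hc]
  exact assemble_eq _ _ _ _

-- ===== VERDICT (by name: the statement is the Claim_ definition above) =====
theorem merge_tracks_spec : Claim_equal_merge_tracks := by
  intro m c _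
  unfold Spec_merge_tracks
  exact merge_tracks_eq_alt m c
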